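-- pv_equiv track=rewrite | github.com/FAIRmat-NFDI/pynxtools-xps | src/pynxtools_xps/parsers/vms_export/metadata.py | _handle_repetitions
-- ===== SOURCE A (Python) =====
-- from collections import Counter
--
-- def _handle_repetitions(input_list: list[str]) -> list[str]:
--     """
--     Process a list of strings to handle repeated items by appending a suffix
--     to each duplicate item. The suffix is in the format '_n', where 'n' is the
--     occurrence number of that item in the list.
--
--     Parameters:
--     - input_list (List[str]): A list of strings where repeated items are
--       identified and renamed with a suffix.
--
--     Returns:
--     - List[str]: A new list where repeated items are modified by appending
--       a suffix to make them unique.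
--     """
--     counts = Counter(input_list)
--     result = []
--     occurrences = {}
--
--     for item in input_list:
--         if counts[item] > 1:
--             # If the item has been seen before, add a suffix
--             if item not in occurrences:
--                 occurrences[item] = 0
--             occurrences[item] += 1
--             result.append(f"{item}_{occurrences[item]}")
--         else:
--             result.append(item)
--
--     return result
-- ===== SOURCE B (Python) =====
-- def _handle_repetitions(input_list: list[str]) -> list[str]:
--     positions = {}
--     for i, item in enumerate(input_list):
--         positions.setdefault(item, []).append(i)
--     result = list(input_list)
--     for item, idxs in positions.items():
--         if len(idxs) > 1:
--             for n, i in enumerate(idxs, 1):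
--                 result[i] = f"{item}_{n}"
--     return result
-- ===== Notes on version B (the rewrite author's own statement) =====
-- stated objective: alternative
-- what changed: Replaces A's Counter plus running per-item occurrence dict with a position index (item -> list of its indices) built in one pass, then scatter-writes result[i] = f'{item}_{n}' into a copy of the input for items with more than one occurrence.
import Mathlib
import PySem

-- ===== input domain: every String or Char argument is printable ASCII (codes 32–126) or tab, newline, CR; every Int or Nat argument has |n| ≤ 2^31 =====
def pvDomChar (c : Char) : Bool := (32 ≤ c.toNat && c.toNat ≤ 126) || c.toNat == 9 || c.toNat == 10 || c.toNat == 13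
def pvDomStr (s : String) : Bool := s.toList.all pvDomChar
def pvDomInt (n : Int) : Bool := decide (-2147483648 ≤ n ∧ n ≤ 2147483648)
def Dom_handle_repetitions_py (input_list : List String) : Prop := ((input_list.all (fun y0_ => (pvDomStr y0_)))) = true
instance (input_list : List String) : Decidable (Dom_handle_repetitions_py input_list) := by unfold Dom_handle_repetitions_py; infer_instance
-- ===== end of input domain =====

-- B replaces A's Counter + running occurrences dict by a position index (item -> list of
-- indices) built in one pass, followed by scatter-writes into a copy of the input (alternative).


-- ===== PORT A =====
-- counts = Counter(input_list); then one pass keeping result / occurrences accumulators.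
def handle_repetitions_py (input_list : List String) : List String :=
  let counts := PySem.Dict.counter input_list
  (input_list.foldl
    (fun (st : List String × PySem.Dict String Int) item =>
      if counts.getD item 0 > 1 then
        let occ := if st.2.contains item = false then st.2.insert item 0 else st.2
        let occ := occ.modify item 0 (· + 1)
        (st.1 ++ [item ++ "_" ++ PySem.Int.toStr (occ.getD item 0)], occ)
      else
        (st.1 ++ [item], st.2))
    ([], PySem.Dict.empty)).1

-- ===== PORT B =====
-- positions: one pass building item -> list of its indices; then scatter-writes
-- result[i] = f"{item}_{n}" into a copy of the input for items with > 1 occurrence.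
-- (result = list(input_list) is a copy in Python; Lean lists are immutable, so it is input_list.)
def handle_repetitions_py_alt (input_list : List String) : List String :=
  let positions := (PySem.List.enumerate input_list 0).foldl
      (fun (d : PySem.Dict String (List Int)) p => d.modify p.2 [] (· ++ [p.1])) PySem.Dict.empty
  let result := input_list
  positions.items.foldl
    (fun res kv =>
      if 1 < kv.2.length then
        (PySem.List.enumerate kv.2 1).foldl
          (fun r q => PySem.List.pySetD r q.2 (kv.1 ++ "_" ++ PySem.Int.toStr q.1)) res
      else res)
    result

-- ===== PRECONDITION & SPEC =====
def Spec_handle_repetitions_py (input_list : List String) (out : List String) : Prop := out = handle_repetitions_py_alt input_list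
instance (input_list : List String) (out : List String) : Decidable (Spec_handle_repetitions_py input_list out) := by unfold Spec_handle_repetitions_py; infer_instance

-- ===== CLAIM (what is proved, stated in full; the proofs are below) =====
def Claim_equal_handle_repetitions_py : Prop := ∀ (input_list : List String), Dom_handle_repetitions_py input_list → Spec_handle_repetitions_py input_list (handle_repetitions_py input_list)

-- ===== LEMMAS AND PROOFS =====

-- A's loop body, named so the loop lemma can rewrite it step by step
def pvStepA (xs : List String) (st : List String × PySem.Dict String Int) (item : String) :
    List String × PySem.Dict String Int :=
  if (PySem.Dict.counter xs).getD item 0 > 1 then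
    let occ := if st.2.contains item = false then st.2.insert item 0 else st.2
    let occ := occ.modify item 0 (· + 1)
    (st.1 ++ [item ++ "_" ++ PySem.Int.toStr (occ.getD item 0)], occ)
  else
    (st.1 ++ [item], st.2)

-- canonical form both ports reduce to: process l after prefix pre of the full list xs
def pvGo (xs : List String) : List String → List String → List String
  | _, [] => []
  | pre, x :: t =>
    (if 1 < (List.count x xs : Int) then
        x ++ "_" ++ PySem.Int.toStr ((List.count x pre : Int) + 1)
      else x) :: pvGo xs (pre ++ [x]) t

theorem pv_getD_not_contains (d : PySem.Dict String Int) (k : String)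
    (h : d.contains k = false) : d.getD k 0 = 0 := by
  have hn := (PySem.Dict.get?_eq_none_iff_contains d k).mpr h
  simp [PySem.Dict.getD, hn]

theorem pv_occ_step (occ : PySem.Dict String Int) (x : String) (pre : List String)
    (hx : occ.getD x 0 = (List.count x pre : Int)) :
    ∀ v, occ.getD v 0 = (List.count v pre : Int) →
      ((if occ.contains x = false then occ.insert x 0 else occ).modify x 0 (· + 1)).getD v 0
        = (List.count v (pre ++ [x]) : Int) := by
  intro v hv
  rw [PySem.Dict.getD_modify]
  have hbase : (if occ.contains x = false then occ.insert x 0 else occ).getD v 0 = occ.getD v 0 := by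
    by_cases hcx : occ.contains x = false
    · rw [if_pos hcx]
      by_cases hvx : v = x
      · subst hvx
        rw [PySem.Dict.getD_insert_self, pv_getD_not_contains occ v hcx]
      · exact PySem.Dict.getD_insert_of_ne _ _ _ hvx
    · rw [if_neg hcx]
  by_cases hvx : v = x
  · subst hvx
    rw [if_pos rfl, hbase, hv]
    simp [List.count_append]
  · rw [if_neg hvx, hbase, hv]
    have : List.count v [x] = 0 := by simp [List.count_singleton']; exact fun h => hvx h.symm
    simp [List.count_append, this]

theorem pvA_go (xs : List String) :
    ∀ (l pre acc : List String) (occ : PySem.Dict String Int),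
      (∀ v, 1 < (List.count v xs : Int) → occ.getD v 0 = (List.count v pre : Int)) →
      (l.foldl (pvStepA xs) (acc, occ)).1 = acc ++ pvGo xs pre l := by
  intro l
  induction l with
  | nil => intro pre acc occ _; simp [pvGo]
  | cons x t ih =>
    intro pre acc occ hocc
    rw [List.foldl_cons]
    by_cases hc : 1 < (List.count x xs : Int)
    · have hcond : (PySem.Dict.counter xs).getD x 0 > 1 := by
        rw [PySem.Dict.getD_counter]; exact hc
      have hstep : pvStepA xs (acc, occ) x =
          (acc ++ [x ++ "_" ++ PySem.Int.toStr
              (((if occ.contains x = false then occ.insert x 0 else occ).modify x 0 (· + 1)).getD x 0)],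
           (if occ.contains x = false then occ.insert x 0 else occ).modify x 0 (· + 1)) := by
        simp only [pvStepA]; rw [if_pos hcond]
      rw [hstep, ih (pre ++ [x]) _ _
        (fun v hv => pv_occ_step occ x pre (hocc x hc) v (hocc v hv))]
      have hval : ((if occ.contains x = false then occ.insert x 0 else occ).modify x 0 (· + 1)).getD x 0
          = (List.count x pre : Int) + 1 := by
        have := pv_occ_step occ x pre (hocc x hc) x (hocc x hc)
        rw [this]; simp [List.count_append]
      rw [hval]
      simp [pvGo, hc]
    · have hcond : ¬ (PySem.Dict.counter xs).getD x 0 > 1 := by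
        rw [PySem.Dict.getD_counter]; exact hc
      have hstep : pvStepA xs (acc, occ) x = (acc ++ [x], occ) := by
        simp only [pvStepA]; rw [if_neg hcond]
      have hocc' : ∀ v, 1 < (List.count v xs : Int) → occ.getD v 0 = (List.count v (pre ++ [x]) : Int) := by
        intro v hv
        have hvx : v ≠ x := fun h => hc (h ▸ hv)
        have : List.count v [x] = 0 := by simp [List.count_singleton']; exact fun h => hvx h.symm
        rw [hocc v hv]; simp [List.count_append, this]
      rw [hstep, ih (pre ++ [x]) _ _ hocc']
      simp [pvGo, hc]

theorem pvB_go (xs : List String) :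
    ∀ (l pre : List String), xs = pre ++ l →
      (PySem.List.enumerate l (pre.length : Int)).map (fun p =>
        if PySem.List.count xs p.2 > 1 then
          p.2 ++ "_" ++ PySem.Int.toStr ((PySem.List.count (PySem.List.slice xs none (some (p.1 + 1))) p.2 : Int))
        else p.2) = pvGo xs pre l := by
  intro l
  induction l with
  | nil => intro pre _; simp [pvGo, PySem.List.enumerate]
  | cons x t ih =>
    intro pre hxs
    rw [PySem.List.enumerate_cons, List.map_cons]
    have h1 : ((pre.length : Int) + 1) = (((pre ++ [x]).length : Int)) := by simp
    rw [h1, ih (pre ++ [x]) (by simpa using hxs)]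
    have hsl : PySem.List.slice xs none (some ((pre.length : Int) + 1)) = pre ++ [x] := by
      rw [PySem.List.slice_to xs (b := (pre.length : Int) + 1) (by positivity)]
      have h2 : ((pre.length : Int) + 1).toNat = pre.length + 1 := by omega
      rw [h2, hxs, List.take_append]
      simp
    simp only [pvGo]
    congr 1
    simp only [h1.symm, hsl]
    by_cases hc : 1 < (List.count x xs : Int)
    · have hc' : PySem.List.count xs x > 1 := by
        simp only [PySem.List.count] at *; exact_mod_cast hc
      rw [if_pos hc', if_pos hc]
      have : (PySem.List.count (pre ++ [x]) x : Int) = (List.count x pre : Int) + 1 := by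
        simp [PySem.List.count, List.count_append]
      rw [this]
    · have hc' : ¬ PySem.List.count xs x > 1 := by
        simp only [PySem.List.count] at *; exact_mod_cast hc
      rw [if_neg hc', if_neg hc]

-- the one-comprehension intermediate form both pvB_go and the scatter proof target
def pvMapForm (xs : List String) : List String :=
  (PySem.List.enumerate xs 0).map (fun p =>
    if PySem.List.count xs p.2 > 1 then
      p.2 ++ "_" ++ PySem.Int.toStr ((PySem.List.count (PySem.List.slice xs none (some (p.1 + 1))) p.2 : Int))
    else p.2)

-- ---- B-side: named pieces of the scatter fold (definitionally the port's lambdas) ----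
def pvVal (v : String) (n : Int) : String := v ++ "_" ++ PySem.Int.toStr n

def pvInner (v : String) (l : List (Int × Int)) (r : List String) : List String :=
  l.foldl (fun r q => PySem.List.pySetD r q.2 (pvVal v q.1)) r

def pvStepB (res : List String) (kv : String × List Int) : List String :=
  if 1 < kv.2.length then pvInner kv.1 (PySem.List.enumerate kv.2 1) res else res

def pvOuter (L : List (String × List Int)) (r : List String) : List String := L.foldl pvStepB r

def pvPositions (xs : List String) : PySem.Dict String (List Int) :=
  (PySem.List.enumerate xs 0).foldl
    (fun (d : PySem.Dict String (List Int)) p => d.modify p.2 [] (· ++ [p.1])) PySem.Dict.empty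

def pvIdx (xs : List String) (v : String) : List Int :=
  ((PySem.List.enumerate xs 0).filter (fun p => p.2 == v)).map (·.1)

-- ---- positions facts ----
theorem pv_getD_foldl_swap (v : String) :
    ∀ (l : List (Int × String)) (d : PySem.Dict String (List Int)),
      (l.foldl (fun d p => d.modify p.2 [] (· ++ [p.1])) d).getD v []
        = d.getD v [] ++ ((l.filter (fun p => p.2 == v)).map (·.1)) := by
  intro l
  induction l with
  | nil => intro d; simp
  | cons p t ih =>
    intro d
    rw [List.foldl_cons, ih]
    by_cases h : p.2 = v
    · simp [h]
    · have h' : ¬ v = p.2 := fun hh => h hh.symm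
      simp [h, h', PySem.Dict.getD_modify]

theorem pvPositions_getD (xs : List String) (v : String) :
    (pvPositions xs).getD v [] = pvIdx xs v := by
  unfold pvPositions pvIdx
  rw [pv_getD_foldl_swap v (PySem.List.enumerate xs 0) PySem.Dict.empty]
  simp [PySem.Dict.getD_empty]

theorem pvPositions_keys (xs : List String) :
    (pvPositions xs).keys = PySem.Set.ofList xs := by
  unfold pvPositions
  have h := PySem.Dict.keys_foldl_modify_key (l := PySem.List.enumerate xs 0)
    (key := fun p => p.2) (d0 := ([] : List Int)) (f := fun _ p l => l ++ [p.1])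
    (d := PySem.Dict.empty)
  simpa [PySem.List.map_snd_enumerate, PySem.Dict.keys_empty, PySem.Set.update, PySem.Set.ofList]
    using h

theorem pvPositions_items (xs : List String) :
    (pvPositions xs).items = (PySem.Set.ofList xs).map (fun w => (w, pvIdx xs w)) := by
  have hnd : (pvPositions xs).keys.Nodup := by
    rw [pvPositions_keys]; exact PySem.Set.nodup_ofList xs
  rw [PySem.Dict.items_eq_map_keys (pvPositions xs) hnd [], pvPositions_keys]
  exact List.map_congr_left (fun w _ => by rw [pvPositions_getD])

-- ---- pvIdx facts ----
theorem pvIdx_gen_length (v : String) :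
    ∀ (xs : List String) (s : Int),
      (((PySem.List.enumerate xs s).filter (fun p => p.2 == v)).map (·.1)).length
        = List.count v xs := by
  intro xs
  induction xs with
  | nil => intro s; simp [PySem.List.enumerate]
  | cons x t ih =>
    intro s
    rw [PySem.List.enumerate_cons]
    by_cases h : x = v
    · simp [h, ih]
    · have h' : ¬ v = x := fun hh => h hh.symm
      simp [h, ih]

theorem pvIdx_length (xs : List String) (v : String) :
    (pvIdx xs v).length = List.count v xs := pvIdx_gen_length v xs 0

theorem pvIdx_gen_mem (v : String) (xs : List String) (s i : Int) :
    i ∈ ((PySem.List.enumerate xs s).filter (fun p => p.2 == v)).map (·.1)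
      ↔ ∃ (m : Nat) (_ : m < xs.length), i = s + (m : Int) ∧ xs[m] = v := by
  constructor
  · intro hi
    obtain ⟨p, hp, hp1⟩ := List.mem_map.mp hi
    obtain ⟨hpe, hpv⟩ := List.mem_filter.mp hp
    obtain ⟨m, hm, hpm⟩ := (PySem.List.mem_enumerate_iff xs s p).mp hpe
    refine ⟨m, hm, ?_, ?_⟩
    · rw [← hp1, hpm]
    · have := of_decide_eq_true (by simpa using hpv)
      rw [hpm] at this; simpa using this
  · rintro ⟨m, hm, hi, hv⟩
    refine List.mem_map.mpr ⟨(s + (m : Int), xs[m]), List.mem_filter.mpr ⟨?_, by simp [hv]⟩, by simp [hi]⟩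
    exact (PySem.List.mem_enumerate_iff xs s _).mpr ⟨m, hm, rfl⟩

theorem pvIdx_mem (xs : List String) (v : String) (i : Int) :
    i ∈ pvIdx xs v ↔ ∃ (m : Nat) (_ : m < xs.length), i = (m : Int) ∧ xs[m] = v := by
  unfold pvIdx
  rw [pvIdx_gen_mem]
  simp

theorem pvIdx_pairwise (xs : List String) (v : String) :
    (pvIdx xs v).Pairwise (· < ·) := by
  unfold pvIdx
  rw [List.pairwise_map]
  exact List.Pairwise.sublist List.filter_sublist (PySem.List.pairwise_lt_enumerate xs 0)

theorem pvIdx_getElem (xs : List String) (v : String) (k : Nat) (hk : k < xs.length)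
    (hv : xs[k] = v) :
    ∃ (hj : List.count v (xs.take k) < (pvIdx xs v).length),
      (pvIdx xs v)[List.count v (xs.take k)] = (k : Int) := by
  have hsplit : xs = xs.take k ++ xs[k] :: xs.drop (k + 1) := by
    rw [List.getElem_cons_drop, List.take_append_drop]
  have hlen : (xs.take k).length = k := List.length_take_of_le (by omega)
  have hidx : pvIdx xs v
      = (((PySem.List.enumerate (xs.take k) 0).filter (fun p => p.2 == v)).map (·.1))
        ++ ((k : Int)
          :: (((PySem.List.enumerate (xs.drop (k + 1)) ((k : Int) + 1)).filter (fun p => p.2 == v)).map (·.1))) := by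
    unfold pvIdx
    conv_lhs => rw [hsplit]
    rw [PySem.List.enumerate_append, PySem.List.enumerate_cons, List.filter_append,
      List.filter_cons, List.map_append]
    simp [hlen, hv, add_comm]
  have hfl : (((PySem.List.enumerate (xs.take k) 0).filter (fun p => p.2 == v)).map (·.1)).length
      = List.count v (xs.take k) := pvIdx_gen_length v (xs.take k) 0
  have hjlen : List.count v (xs.take k) < (pvIdx xs v).length := by
    rw [hidx]; simp [hfl]
  refine ⟨hjlen, ?_⟩
  have hq : (pvIdx xs v)[List.count v (xs.take k)]? = some (k : Int) := by
    rw [hidx, List.getElem?_append_right (by omega), ← hfl]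
    simp
  exact (List.getElem_eq_iff hjlen).mpr hq

-- ---- scatter fold: length and pointwise value ----
theorem pvInner_length (v : String) :
    ∀ (l : List (Int × Int)) (r : List String), (pvInner v l r).length = r.length := by
  intro l
  induction l with
  | nil => intro r; simp [pvInner]
  | cons q t ih =>
    intro r
    unfold pvInner
    rw [List.foldl_cons]
    exact (ih (PySem.List.pySetD r q.2 (pvVal v q.1))).trans (PySem.List.length_pySetD r q.2 _)

theorem pvOuter_length :
    ∀ (L : List (String × List Int)) (r : List String), (pvOuter L r).length = r.length := by
  intro L
  induction L with
  | nil => intro r; simp [pvOuter]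
  | cons kv t ih =>
    intro r
    unfold pvOuter
    rw [List.foldl_cons]
    refine (ih (pvStepB r kv)).trans ?_
    unfold pvStepB
    split
    · exact pvInner_length kv.1 _ r
    · rfl

theorem pvInner_preserve (v : String) (k : Nat) :
    ∀ (l : List (Int × Int)) (r : List String),
      (∀ q ∈ l, ∃ m : Nat, q.2 = (m : Int) ∧ m < r.length) →
      (∀ q ∈ l, q.2 ≠ (k : Int)) →
      PySem.List.pyGetD (pvInner v l r) (k : Int) "" = PySem.List.pyGetD r (k : Int) "" := by
  intro l
  induction l with
  | nil => intro r _ _; simp [pvInner]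
  | cons q t ih =>
    intro r hb hne
    obtain ⟨m, hq2, hm⟩ := hb q (List.mem_cons_self ..)
    unfold pvInner
    rw [List.foldl_cons]
    have hr : (PySem.List.pySetD r q.2 (pvVal v q.1)).length = r.length :=
      PySem.List.length_pySetD r q.2 _
    have := ih (PySem.List.pySetD r q.2 (pvVal v q.1))
      (fun p hp => by obtain ⟨m', h1, h2⟩ := hb p (List.mem_cons_of_mem _ hp); exact ⟨m', h1, by omega⟩)
      (fun p hp => hne p (List.mem_cons_of_mem _ hp))
    unfold pvInner at this
    rw [this, hq2, PySem.List.pyGetD_pySetD_natCast r m k _ "" hm]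
    have : k ≠ m := by
      intro h
      exact hne q (List.mem_cons_self ..) (by rw [hq2, h])
    rw [if_neg this]

theorem pvInner_write (v : String) (k : Nat) :
    ∀ (idxs : List Int) (s : Int) (r : List String) (j : Nat)
      (_ : idxs.Pairwise (· < ·)) (hj : j < idxs.length),
      idxs[j] = (k : Int) →
      (∀ i ∈ idxs, ∃ m : Nat, i = (m : Int) ∧ m < r.length) →
      PySem.List.pyGetD (pvInner v (PySem.List.enumerate idxs s) r) (k : Int) ""
        = pvVal v (s + (j : Int)) := by
  intro idxs
  induction idxs with
  | nil => intro s r j _ hj _ _; simp at hj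
  | cons i0 t ih =>
    intro s r j hpw hj hkj hb
    rw [PySem.List.enumerate_cons]
    unfold pvInner
    rw [List.foldl_cons]
    obtain ⟨m0, hi0, hm0⟩ := hb i0 (List.mem_cons_self ..)
    cases j with
    | zero =>
      have hi0k : i0 = (k : Int) := by simpa using hkj
      have hall : ∀ q ∈ PySem.List.enumerate t (s + 1), q.2 ≠ (k : Int) := by
        intro q hq
        obtain ⟨m, hm, hqm⟩ := (PySem.List.mem_enumerate_iff t (s + 1) q).mp hq
        have hlt : i0 < t[m] := (List.pairwise_cons.mp hpw).1 t[m] (List.getElem_mem hm)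
        rw [hqm]
        simp only []
        intro h
        rw [h] at hlt
        omega
      have hbe : ∀ q ∈ PySem.List.enumerate t (s + 1),
          ∃ m : Nat, q.2 = (m : Int) ∧ m < (PySem.List.pySetD r i0 (pvVal v s)).length := by
        intro q hq
        obtain ⟨m, hm, hqm⟩ := (PySem.List.mem_enumerate_iff t (s + 1) q).mp hq
        obtain ⟨m', h1, h2⟩ := hb t[m] (List.mem_cons_of_mem _ (List.getElem_mem hm))
        exact ⟨m', by rw [hqm]; simpa using h1, by rw [PySem.List.length_pySetD]; omega⟩
      have hpres := pvInner_preserve v k (PySem.List.enumerate t (s + 1))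
        (PySem.List.pySetD r i0 (pvVal v s)) hbe hall
      unfold pvInner at hpres
      rw [hpres, hi0k]
      have hkr : k < r.length := by
        have : (m0 : Int) = (k : Int) := by rw [← hi0, hi0k]
        omega
      rw [PySem.List.pyGetD_pySetD_natCast r k k (pvVal v s) "" hkr]
      simp
    | succ j' =>
      have hj' : j' < t.length := by simpa using hj
      have hkt : t[j'] = (k : Int) := by simpa using hkj
      have := ih (s + 1) (PySem.List.pySetD r i0 (pvVal v s)) j'
        ((List.pairwise_cons.mp hpw).2) hj' hkt
        (fun i hi => by
          obtain ⟨m', h1, h2⟩ := hb i (List.mem_cons_of_mem _ hi)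
          exact ⟨m', h1, by rw [PySem.List.length_pySetD]; omega⟩)
      unfold pvInner at this
      rw [this]
      congr 1
      push_cast
      omega

theorem pvOuter_preserve (k : Nat) :
    ∀ (L : List (String × List Int)) (r : List String),
      (∀ kv ∈ L, ∀ i ∈ kv.2, ∃ m : Nat, i = (m : Int) ∧ m < r.length) →
      (∀ kv ∈ L, 1 < kv.2.length → (k : Int) ∉ kv.2) →
      PySem.List.pyGetD (pvOuter L r) (k : Int) "" = PySem.List.pyGetD r (k : Int) "" := by
  intro L
  induction L with
  | nil => intro r _ _; simp [pvOuter]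
  | cons kv t ih =>
    intro r hb hk
    unfold pvOuter
    rw [List.foldl_cons]
    have hlen : (pvStepB r kv).length = r.length := by
      unfold pvStepB; split
      · exact pvInner_length kv.1 _ r
      · rfl
    have hstep : PySem.List.pyGetD (pvStepB r kv) (k : Int) "" = PySem.List.pyGetD r (k : Int) "" := by
      unfold pvStepB
      split
      · next h =>
        refine pvInner_preserve kv.1 k _ r ?_ ?_
        · intro q hq
          obtain ⟨m, hm, hqm⟩ := (PySem.List.mem_enumerate_iff kv.2 1 q).mp hq
          obtain ⟨m', h1, h2⟩ := hb kv (List.mem_cons_self ..) kv.2[m] (List.getElem_mem hm)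
          exact ⟨m', by rw [hqm]; simpa using h1, h2⟩
        · intro q hq
          obtain ⟨m, hm, hqm⟩ := (PySem.List.mem_enumerate_iff kv.2 1 q).mp hq
          have hnot := hk kv (List.mem_cons_self ..) h
          rw [hqm]
          simp only []
          intro hcon
          exact hnot (hcon ▸ List.getElem_mem hm)
      · rfl
    have := ih (pvStepB r kv)
      (fun p hp i hi => by
        obtain ⟨m', h1, h2⟩ := hb p (List.mem_cons_of_mem _ hp) i hi
        exact ⟨m', h1, by omega⟩)
      (fun p hp => hk p (List.mem_cons_of_mem _ hp))
    unfold pvOuter at this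
    rw [this, hstep]

-- value of the scatter result at a duplicated index
theorem pvOuter_write (k : Nat) (v : String) (idxs : List Int) (j : Nat)
    (La Lb : List (String × List Int)) (r : List String)
    (hb : ∀ kv ∈ La ++ (v, idxs) :: Lb, ∀ i ∈ kv.2, ∃ m : Nat, i = (m : Int) ∧ m < r.length)
    (hother : ∀ kv ∈ La ++ Lb, (k : Int) ∉ kv.2)
    (hgt : 1 < idxs.length) (hpw : idxs.Pairwise (· < ·)) (hj : j < idxs.length)
    (hkj : idxs[j] = (k : Int)) :
    PySem.List.pyGetD (pvOuter (La ++ (v, idxs) :: Lb) r) (k : Int) ""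
      = pvVal v (1 + (j : Int)) := by
  unfold pvOuter
  rw [List.foldl_append, List.foldl_cons]
  have hLa : ∀ kv ∈ La, kv ∈ La ++ (v, idxs) :: Lb := fun kv h => List.mem_append_left _ h
  have hlenLa : (La.foldl pvStepB r).length = r.length := pvOuter_length La r
  have hstepeq : ∀ X : List String,
      pvStepB X (v, idxs) = pvInner v (PySem.List.enumerate idxs 1) X := by
    intro X; unfold pvStepB; rw [if_pos (by simpa using hgt)]
  have hmidlen : (pvStepB (La.foldl pvStepB r) (v, idxs)).length = r.length := by
    rw [hstepeq]
    exact (pvInner_length _ _ _).trans hlenLa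
  have hmid : PySem.List.pyGetD (pvStepB (La.foldl pvStepB r) (v, idxs)) (k : Int) ""
      = pvVal v (1 + (j : Int)) := by
    rw [hstepeq]
    exact pvInner_write v k idxs 1 (La.foldl pvStepB r) j hpw hj hkj
      (fun i hi => by
        obtain ⟨m, h1, h2⟩ := hb (v, idxs) (List.mem_append_right _ (List.mem_cons_self ..)) i hi
        exact ⟨m, h1, by rw [hlenLa]; omega⟩)
  have := pvOuter_preserve k Lb (pvStepB (La.foldl pvStepB r) (v, idxs))
    (fun p hp i hi => by
      obtain ⟨m, h1, h2⟩ := hb p (List.mem_append_right _ (List.mem_cons_of_mem _ hp)) i hi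
      exact ⟨m, h1, by rw [hmidlen]; omega⟩)
    (fun p hp _ => hother p (List.mem_append_right _ hp))
  unfold pvOuter at this
  rw [this, hmid]

-- k is an index of w in xs only when xs[k] = w
theorem pv_not_mem_pvIdx (xs : List String) (k : Nat) (hk : k < xs.length)
    (w : String) (hw : xs[k] ≠ w) : (k : Int) ∉ pvIdx xs w := by
  intro hmem
  obtain ⟨m, hm, h1, h2⟩ := (pvIdx_mem xs w _).mp hmem
  have hmk : m = k := by omega
  have h3 : xs[m]? = some w := by rw [List.getElem?_eq_getElem hm, h2]
  rw [hmk, List.getElem?_eq_getElem hk] at h3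
  exact hw (by simpa using h3)

theorem pv_hb_items (xs : List String) :
    ∀ kv ∈ (PySem.Set.ofList xs).map (fun w => (w, pvIdx xs w)),
      ∀ i ∈ kv.2, ∃ m : Nat, i = (m : Int) ∧ m < xs.length := by
  intro kv hkv i hi
  obtain ⟨w, _, hw⟩ := List.mem_map.mp hkv
  rw [← hw] at hi
  obtain ⟨m, hm, h1, _⟩ := (pvIdx_mem xs w i).mp hi
  exact ⟨m, h1, hm⟩

theorem pvMapForm_length (xs : List String) : (pvMapForm xs).length = xs.length := by
  simp [pvMapForm, PySem.List.length_enumerate]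

theorem pvMapForm_getElem? (xs : List String) (k : Nat) (hk : k < xs.length) :
    (pvMapForm xs)[k]? = some (if 1 < List.count xs[k] xs
      then xs[k] ++ "_" ++ PySem.Int.toStr ((List.count xs[k] (xs.take (k + 1)) : Int))
      else xs[k]) := by
  unfold pvMapForm
  rw [List.getElem?_map, PySem.List.getElem?_enumerate, List.getElem?_eq_getElem hk]
  simp only [Option.map_some]
  have hsl : PySem.List.slice xs none (some ((0 : Int) + (k : Int) + 1)) = xs.take (k + 1) := by
    rw [PySem.List.slice_to xs (b := (0 : Int) + (k : Int) + 1) (by positivity)]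
    congr 1
    omega
  simp only [hsl, PySem.List.count]

theorem pvAlt_eq_mapForm (xs : List String) :
    handle_repetitions_py_alt xs = pvMapForm xs := by
  have hL : handle_repetitions_py_alt xs
      = pvOuter ((PySem.Set.ofList xs).map (fun w => (w, pvIdx xs w))) xs := by
    show pvOuter (pvPositions xs).items xs = _
    rw [pvPositions_items]
  rw [hL]
  apply List.ext_getElem ((pvOuter_length _ xs).trans (pvMapForm_length xs).symm)
  intro k hk1 hk2
  have hkx : k < xs.length := by
    rw [pvOuter_length] at hk1; exact hk1
  have hobs : ∀ (l : List String) (hl : k < l.length),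
      l[k]'hl = PySem.List.pyGetD l (k : Int) "" := by
    intro l hl
    rw [PySem.List.pyGetD_eq_getElem l "" (by positivity) (by exact_mod_cast hl)]
    simp
  have hrhs : (pvMapForm xs)[k]'hk2 = (if 1 < List.count xs[k] xs
      then xs[k] ++ "_" ++ PySem.Int.toStr ((List.count xs[k] (xs.take (k + 1)) : Int))
      else xs[k]) := by
    have := pvMapForm_getElem? xs k hkx
    rw [List.getElem?_eq_getElem hk2] at this
    exact Option.some_injective _ this
  rw [hobs _ hk1, hrhs]
  by_cases hdup : 1 < List.count xs[k] xs
  · -- duplicated item: exactly one scatter write hits index k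
    rw [if_pos hdup]
    have hmem : xs[k] ∈ PySem.Set.ofList xs :=
      (PySem.Set.mem_ofList xs _).mpr (List.getElem_mem hkx)
    obtain ⟨la, lb, hsplit⟩ := List.append_of_mem hmem
    have hnd : (la ++ xs[k] :: lb).Nodup := by
      rw [← hsplit]; exact PySem.Set.nodup_ofList xs
    have hvla : xs[k] ∉ la := by
      intro h
      exact (List.disjoint_of_nodup_append hnd) h (List.mem_cons_self ..)
    have hvlb : xs[k] ∉ lb := by
      have := (List.nodup_append.mp hnd).2.1
      exact (List.nodup_cons.mp this).1
    have hLsplit : (PySem.Set.ofList xs).map (fun w => (w, pvIdx xs w))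
        = la.map (fun w => (w, pvIdx xs w))
          ++ (xs[k], pvIdx xs xs[k]) :: lb.map (fun w => (w, pvIdx xs w)) := by
      rw [hsplit]; simp
    obtain ⟨hj, hkj⟩ := pvIdx_getElem xs xs[k] k hkx rfl
    rw [hLsplit]
    rw [pvOuter_write k xs[k] (pvIdx xs xs[k]) (List.count xs[k] (xs.take k))
      (la.map (fun w => (w, pvIdx xs w))) (lb.map (fun w => (w, pvIdx xs w))) xs
      (by rw [← hLsplit]; exact pv_hb_items xs)
      ?_ (by rw [pvIdx_length]; exact hdup) (pvIdx_pairwise xs xs[k]) hj hkj]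
    · unfold pvVal
      congr 1
      have hcnt : List.count xs[k] (xs.take (k + 1)) = List.count xs[k] (xs.take k) + 1 := by
        rw [List.take_add_one, List.getElem?_eq_getElem hkx, Option.toList_some,
          List.count_append, List.count_singleton]
        simp
      rw [hcnt]
      push_cast
      ring
    · intro kv hkv
      rcases List.mem_append.mp hkv with h | h <;>
      · obtain ⟨w, hw, hweq⟩ := List.mem_map.mp h
        rw [← hweq]
        refine pv_not_mem_pvIdx xs k hkx w (fun hcon => ?_)
        first
        | exact hvla (hcon ▸ hw)
        | exact hvlb (hcon ▸ hw)
  · -- unique item: no write touches index k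
    rw [if_neg hdup]
    rw [pvOuter_preserve k _ xs (pv_hb_items xs) ?_]
    · exact (hobs xs hkx).symm
    · intro kv hkv hlen
      obtain ⟨w, _, hweq⟩ := List.mem_map.mp hkv
      rw [← hweq] at hlen ⊢
      by_cases hwv : xs[k] = w
      · rw [pvIdx_length, ← hwv] at hlen
        exact absurd hlen (by omega)
      · exact pv_not_mem_pvIdx xs k hkx w hwv

-- ===== VERDICT (by name: the statement is the Claim_ definition above) =====
theorem handle_repetitions_py_spec : Claim_equal_handle_repetitions_py := by
  intro xs _
  show handle_repetitions_py xs = handle_repetitions_py_alt xs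
  have hA : (xs.foldl (pvStepA xs) (([] : List String), PySem.Dict.empty)).1 = [] ++ pvGo xs [] xs :=
    pvA_go xs xs [] [] PySem.Dict.empty (by intro v _; simp [PySem.Dict.getD_empty])
  have hB := pvB_go xs xs [] rfl
  simp only [List.length_nil, Nat.cast_zero] at hB
  calc handle_repetitions_py xs = (xs.foldl (pvStepA xs) (([] : List String), PySem.Dict.empty)).1 := rfl
    _ = [] ++ pvGo xs [] xs := hA
    _ = pvGo xs [] xs := by simp
    _ = pvMapForm xs := hB.symm
    _ = handle_repetitions_py_alt xs := (pvAlt_eq_mapForm xs).symm
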